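-- pv_equiv track=rewrite | github.com/hoffmann-muki/algoexpert-solutions | medium_level/best_seat.py | computeSpaces
-- ===== SOURCE A (Python) =====
-- def computeSpaces(seats, seat_index, n):
--     if seat_index == 0:
--         return -1, -1, -1 # first always occupied
--     elif seats[seat_index] == 1:
--         return -1, -1, -1 # seat is not available
--     else:
--         left_spaces, right_spaces = 0, 0
--         left_index, right_index = seat_index-1, seat_index+1
--         # compute spaces to the left
--         while left_index > -1 and seats[left_index] != 1:
--             left_spaces += 1
--             left_index -= 1
--         # ditto for right spaces
--         while right_index < n and seats[right_index] != 1: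
--             right_spaces += 1
--             right_index += 1
--         return left_spaces + right_spaces, left_spaces, right_spaces
-- ===== SOURCE B (Python) =====
-- def computeSpaces(seats, seat_index, n):
--     if seat_index == 0 or seats[seat_index] == 1:
--         return -1, -1, -1
--     left_seg = seats[:seat_index]
--     if 1 in left_seg:
--         nearest_left = len(left_seg) - 1 - left_seg[::-1].index(1)
--         left_spaces = seat_index - 1 - nearest_left
--     else:
--         left_spaces = seat_index
--     right_seg = seats[seat_index + 1:n]
--     right_spaces = right_seg.index(1) if 1 in right_seg else len(right_seg)
--     return left_spaces + right_spaces, left_spaces, right_spaces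
-- ===== Notes on version B (the rewrite author's own statement) =====
-- stated objective: idiomatic
-- what changed: Replaces the two hand-rolled index-walking while-loops with slicing and list search: the nearest occupied seat on each side is found via `in`/`.index` on seats[:seat_index] (reversed) and seats[seat_index+1:n], and the gap sizes are derived by arithmetic.
-- outside the precondition, e.g. on computeSpaces([1, 0, 0], -1, 3): A returns (0, 0, 0), B returns (-2, -2, 0); on computeSpaces([0, 0, 0, 0], 1, -1): A returns (1, 1, 0), B returns (2, 1, 1); on computeSpaces([0, 0, 1], 1, 5): A returns (1, 1, 0), B returns (1, 1, 0)
import Mathlib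
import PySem

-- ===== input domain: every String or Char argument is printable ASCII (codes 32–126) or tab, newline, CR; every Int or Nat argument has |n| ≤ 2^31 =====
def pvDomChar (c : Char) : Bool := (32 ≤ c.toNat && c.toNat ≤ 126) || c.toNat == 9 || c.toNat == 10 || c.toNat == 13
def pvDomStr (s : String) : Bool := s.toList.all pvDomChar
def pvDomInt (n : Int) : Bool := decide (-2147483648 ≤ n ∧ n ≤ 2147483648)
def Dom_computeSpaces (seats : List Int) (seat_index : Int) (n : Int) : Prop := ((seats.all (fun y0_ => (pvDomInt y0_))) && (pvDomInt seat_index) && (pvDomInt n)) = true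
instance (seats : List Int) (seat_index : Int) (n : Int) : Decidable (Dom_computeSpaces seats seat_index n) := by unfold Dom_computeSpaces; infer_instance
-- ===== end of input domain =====

-- B replaces A's two index-walking while-loops with slicing + list search (nearest occupied
-- seat via index on the sliced segments) and derives the gap sizes by arithmetic; idiomatic,
-- same asymptotic cost.


-- ===== PORT A =====
-- left while-loop: `while left_index > -1 and seats[left_index] != 1: left_spaces += 1; left_index -= 1`
-- (the .getD 1 default is only reached where Python raises IndexError, outside Pre_)
def pvALeft (seats : List Int) (li : Int) (acc : Int) : Int :=
  if h : li > -1 ∧ (PySem.List.pyGet? seats li).getD 1 ≠ 1 then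
    pvALeft seats (li - 1) (acc + 1)
  else acc
termination_by (li + 1).toNat
decreasing_by omega

-- right while-loop: `while right_index < n and seats[right_index] != 1: right_spaces += 1; right_index += 1`
def pvARight (seats : List Int) (n : Int) (ri : Int) (acc : Int) : Int :=
  if h : ri < n ∧ (PySem.List.pyGet? seats ri).getD 1 ≠ 1 then
    pvARight seats n (ri + 1) (acc + 1)
  else acc
termination_by (n - ri).toNat
decreasing_by omega

def computeSpaces (seats : List Int) (seat_index : Int) (n : Int) : Int × Int × Int :=
  if seat_index = 0 then (-1, -1, -1)
  else if (PySem.List.pyGet? seats seat_index).getD 0 = 1 then (-1, -1, -1)  -- none = IndexError, outside Pre_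
  else
    let left_spaces := pvALeft seats (seat_index - 1) 0
    let right_spaces := pvARight seats n (seat_index + 1) 0
    (left_spaces + right_spaces, left_spaces, right_spaces)

-- ===== PORT B =====
def computeSpaces_alt (seats : List Int) (seat_index : Int) (n : Int) : Int × Int × Int :=
  if seat_index = 0 ∨ (PySem.List.pyGet? seats seat_index).getD 0 = 1 then (-1, -1, -1)
  else
    let left_seg := PySem.List.slice seats none (some seat_index)          -- seats[:seat_index]
    let left_spaces : Int :=
      match PySem.List.index? left_seg.reverse 1 with                       -- `1 in left_seg` + left_seg[::-1].index(1)
      | some j => seat_index - 1 - ((left_seg.length : Int) - 1 - (j : Int))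
      | none => seat_index
    let right_seg := PySem.List.slice seats (some (seat_index + 1)) (some n) -- seats[seat_index+1:n]
    let right_spaces : Int :=
      match PySem.List.index? right_seg 1 with                              -- `1 in right_seg` + right_seg.index(1)
      | some j => (j : Int)
      | none => (right_seg.length : Int)
    (left_spaces + right_spaces, left_spaces, right_spaces)

-- ===== PRECONDITION & SPEC =====
-- Pre_ restricts to the natural domain (a valid in-range seat index and 0 ≤ n ≤ len(seats)):
-- outside it A raises IndexError, or returns via Python's negative-index wraparound / negative-bound
-- slicing quirks (negative seat_index, n outside [0, len]) that B's slicing reads differently.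
def Pre_computeSpaces (seats : List Int) (seat_index : Int) (n : Int) : Prop :=
  seat_index = 0 ∨
    (0 < seat_index ∧ seat_index < seats.length ∧ 0 ≤ n ∧ n ≤ seats.length)
instance (seats : List Int) (seat_index : Int) (n : Int) : Decidable (Pre_computeSpaces seats seat_index n) := by unfold Pre_computeSpaces; infer_instance

def pvWitness_computeSpaces : List Int × Int × Int := ([0, 0, 1, 0], 1, 4)

def Spec_computeSpaces (seats : List Int) (seat_index : Int) (n : Int) (out : Int × Int × Int) : Prop := out = computeSpaces_alt seats seat_index n
instance (seats : List Int) (seat_index : Int) (n : Int) (out : Int × Int × Int) : Decidable (Spec_computeSpaces seats seat_index n out) := by unfold Spec_computeSpaces; infer_instance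

-- ===== CLAIM (what is proved, stated in full; the proofs are below) =====
def Claim_equal_computeSpaces : Prop := ∀ (seats : List Int) (seat_index : Int) (n : Int), Dom_computeSpaces seats seat_index n → Pre_computeSpaces seats seat_index n → Spec_computeSpaces seats seat_index n (computeSpaces seats seat_index n)

-- ===== LEMMAS AND PROOFS =====

-- the common value both sides compute: length of the 1-free prefix of a segment
def pvGap (l : List Int) : Int := ((l.takeWhile (fun x => x != 1)).length : Int)

lemma pvIdx_match (l : List Int) :
    (match PySem.List.index? l 1 with
     | some j => (j : Int)
     | none => (l.length : Int)) = pvGap l := by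
  induction l with
  | nil => simp [pvGap, PySem.List.index?]
  | cons x t ih =>
    by_cases hx : x = 1
    · subst hx
      rw [PySem.List.index?_cons_self]
      simp [pvGap]
    · rw [PySem.List.index?_cons_of_ne _ hx]
      cases h : PySem.List.index? t 1 with
      | some j =>
        rw [h] at ih
        simp only [Option.map_some, pvGap, List.takeWhile_cons, bne_iff_ne, ne_eq, hx,
          not_false_eq_true, if_true] at *
        simp at ih ⊢
        omega
      | none =>
        rw [h] at ih
        simp only [Option.map_none, pvGap] at *
        simp [hx] at ih ⊢
        omega

lemma pvARight_eq (seats : List Int) (n : Int) (k : Nat) :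
    ∀ ri acc : Int, 0 ≤ ri → n ≤ seats.length → (n - ri).toNat = k →
      pvARight seats n ri acc = acc + pvGap ((seats.drop ri.toNat).take (n - ri).toNat) := by
  induction k with
  | zero =>
    intro ri acc h0 hn hk
    rw [pvARight, dif_neg (by intro h; omega)]
    simp [hk, pvGap]
  | succ k ih =>
    intro ri acc h0 hn hk
    have hrin : ri < n := by omega
    have hlt : ri.toNat < seats.length := by omega
    have hdrop : seats.drop ri.toNat = seats[ri.toNat] :: seats.drop (ri.toNat + 1) :=
      List.drop_eq_getElem_cons hlt
    have hget : PySem.List.pyGet? seats ri = some seats[ri.toNat] :=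
      PySem.List.pyGet?_eq_some_getElem seats h0 (by omega)
    have hstep : (seats.drop ri.toNat).take (n - ri).toNat
        = seats[ri.toNat] :: (seats.drop ((ri + 1).toNat)).take ((n - (ri + 1)).toNat) := by
      have h2 : (n - ri).toNat = (n - (ri + 1)).toNat + 1 := by omega
      have h3 : ri.toNat + 1 = (ri + 1).toNat := by omega
      rw [h2, hdrop, List.take_succ_cons, h3]
    by_cases hv : seats[ri.toNat] = 1
    · rw [pvARight, dif_neg (by rw [hget]; simp [hv])]
      have hb : (seats[ri.toNat] != 1) = false := by simp [hv]
      rw [hstep]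
      simp only [pvGap, List.takeWhile_cons, hb, Bool.false_eq_true, if_false,
        List.length_nil, Nat.cast_zero, add_zero]
    · rw [pvARight, dif_pos ⟨hrin, by rw [hget]; simpa using hv⟩]
      rw [ih (ri + 1) (acc + 1) (by omega) hn (by omega)]
      have hb : (seats[ri.toNat] != 1) = true := by simpa using hv
      rw [hstep]
      simp only [pvGap, List.takeWhile_cons, hb, if_true, List.length_cons]
      push_cast
      ring

lemma pvALeft_eq (seats : List Int) (k : Nat) :
    ∀ li acc : Int, li < seats.length → (li + 1).toNat = k →
      pvALeft seats li acc = acc + pvGap ((seats.take (li + 1).toNat).reverse) := by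
  induction k with
  | zero =>
    intro li acc hlen hk
    rw [pvALeft, dif_neg (by intro h; omega)]
    simp [hk, pvGap]
  | succ k ih =>
    intro li acc hlen hk
    have h0 : 0 ≤ li := by omega
    have hlt : li.toNat < seats.length := by omega
    have hget : PySem.List.pyGet? seats li = some seats[li.toNat] :=
      PySem.List.pyGet?_eq_some_getElem seats h0 (by omega)
    have hstep : (seats.take (li + 1).toNat).reverse
        = seats[li.toNat] :: (seats.take ((li - 1 + 1).toNat)).reverse := by
      have hk1 : (li + 1).toNat = li.toNat + 1 := by omega
      have htake : seats.take (li.toNat + 1) = seats.take li.toNat ++ [seats[li.toNat]] := by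
        rw [List.take_add_one]
        simp [List.getElem?_eq_getElem hlt]
      have h1 : (li - 1 + 1).toNat = li.toNat := by omega
      rw [hk1, htake, h1, List.reverse_append, List.reverse_singleton, List.singleton_append]
    by_cases hv : seats[li.toNat] = 1
    · rw [pvALeft, dif_neg (by rw [hget]; simp [hv])]
      have hb : (seats[li.toNat] != 1) = false := by simp [hv]
      rw [hstep]
      simp only [pvGap, List.takeWhile_cons, hb, Bool.false_eq_true, if_false,
        List.length_nil, Nat.cast_zero, add_zero]
    · rw [pvALeft, dif_pos ⟨by omega, by rw [hget]; simpa using hv⟩]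
      rw [ih (li - 1) (acc + 1) (by omega) (by omega)]
      have hb : (seats[li.toNat] != 1) = true := by simpa using hv
      rw [hstep]
      simp only [pvGap, List.takeWhile_cons, hb, if_true, List.length_cons]
      push_cast
      ring

-- ===== VERDICT (by name: the statement is the Claim_ definition above) =====
theorem computeSpaces_spec : Claim_equal_computeSpaces := by
  intro seats i n _ hpre
  unfold Spec_computeSpaces computeSpaces computeSpaces_alt
  rcases hpre with h0 | ⟨hi0, hilen, hn0, hnlen⟩
  · simp [h0]
  · rw [if_neg (by omega)]
    by_cases hg : (PySem.List.pyGet? seats i).getD 0 = 1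
    · rw [if_pos hg, if_pos (Or.inr hg)]
    · rw [if_neg hg, if_neg (by rintro (h | h) <;> [omega; exact hg h])]
      -- left side
      have hL := pvALeft_eq seats (i - 1 + 1).toNat (i - 1) 0 (by omega) rfl
      have hR := pvARight_eq seats n (n - (i + 1)).toNat (i + 1) 0 (by omega) hnlen rfl
      have hsl : PySem.List.slice seats none (some i) = seats.take i.toNat :=
        PySem.List.slice_to seats (by omega)
      have hsr : PySem.List.slice seats (some (i + 1)) (some n)
          = (seats.drop (i + 1).toNat).take (n - (i + 1)).toNat := by
        rw [PySem.List.slice_toNat seats (by omega) hn0]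
        congr 1
        omega
      have hlen : (seats.take i.toNat).length = i.toNat := by
        simp; omega
      have hLv : pvALeft seats (i - 1) 0 = pvGap ((seats.take i.toNat).reverse) := by
        rw [hL]
        have : (i - 1 + 1).toNat = i.toNat := by omega
        rw [this]; ring
      have hRv : pvARight seats n (i + 1) 0
          = pvGap ((seats.drop (i + 1).toNat).take (n - (i + 1)).toNat) := by
        rw [hR]; ring
      rw [hsl, hsr, hLv, hRv]
      have hidxL := pvIdx_match (seats.take i.toNat).reverse
      have hidxR := pvIdx_match ((seats.drop (i + 1).toNat).take (n - (i + 1)).toNat)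
      have hBL : (match PySem.List.index? (seats.take i.toNat).reverse 1 with
          | some j => i - 1 - (((seats.take i.toNat).length : Int) - 1 - (j : Int))
          | none => i) = pvGap ((seats.take i.toNat).reverse) := by
        cases hjL : PySem.List.index? (seats.take i.toNat).reverse 1 with
        | some j =>
          rw [hjL] at hidxL
          have h' : (j : Int) = pvGap ((seats.take i.toNat).reverse) := hidxL
          show i - 1 - (((seats.take i.toNat).length : Int) - 1 - (j : Int))
              = pvGap ((seats.take i.toNat).reverse)
          rw [hlen]
          omega
        | none =>
          rw [hjL] at hidxL
          have h' : (((seats.take i.toNat).reverse.length : Nat) : Int)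
              = pvGap ((seats.take i.toNat).reverse) := hidxL
          rw [List.length_reverse, hlen] at h'
          show i = pvGap ((seats.take i.toNat).reverse)
          omega
      have hBR : (match PySem.List.index? ((seats.drop (i + 1).toNat).take (n - (i + 1)).toNat) 1 with
          | some j => (j : Int)
          | none => (((seats.drop (i + 1).toNat).take (n - (i + 1)).toNat).length : Int))
          = pvGap ((seats.drop (i + 1).toNat).take (n - (i + 1)).toNat) := by
        cases hjR : PySem.List.index? ((seats.drop (i + 1).toNat).take (n - (i + 1)).toNat) 1 with
        | some j =>
          rw [hjR] at hidxR
          exact hidxR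
        | none =>
          rw [hjR] at hidxR
          exact hidxR
      simp only [hBL, hBR]
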